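-- pv_equiv track=rewrite | github.com/narendra005/Programming-Basic | Elements Removal - Copy.py | solve
-- ===== SOURCE A (Python) =====
-- def solve(A):
--     A.sort()
--     n=len(A)
--     sum1=0
--     for i in range(len(A)):
--         sum1=sum1+(A[i]*n)
--         n-=1
--     return sum1
-- ===== SOURCE B (Python) =====
-- def solve(A):
--     A.sort()
--     prefix = 0
--     total = 0
--     for x in A:
--         prefix += x
--         total += prefix
--     return total
-- ===== Notes on version B (the rewrite author's own statement) =====
-- stated objective: simpler
-- what changed: Replaces A's indexed loop with a descending weight multiplier (sum1 += A[i]*n; n -= 1) by a single direct pass accumulating a running prefix sum, using the identity sum_i A[i]*(n-i) = sum of prefix sums; no indexing and no per-step multiplication.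
import Mathlib
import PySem

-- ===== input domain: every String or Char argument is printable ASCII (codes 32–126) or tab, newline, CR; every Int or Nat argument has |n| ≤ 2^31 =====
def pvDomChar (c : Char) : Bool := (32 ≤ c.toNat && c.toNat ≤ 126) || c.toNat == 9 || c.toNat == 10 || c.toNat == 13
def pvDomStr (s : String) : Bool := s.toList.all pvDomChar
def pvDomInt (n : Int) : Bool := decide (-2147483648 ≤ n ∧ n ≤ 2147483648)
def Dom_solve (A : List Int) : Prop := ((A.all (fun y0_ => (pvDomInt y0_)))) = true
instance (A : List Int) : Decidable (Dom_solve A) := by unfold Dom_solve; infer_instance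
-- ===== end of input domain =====

-- B replaces A's indexed loop with a descending weight counter by one prefix-sum pass
-- (simpler decomposition, same cost). Both sort A in place; the equivalence proved here is
-- about the return value (the in-place mutation of A is identical in both).

-- ===== PORT A =====
def solve (A : List Int) : Int :=
  let As := PySem.List.sorted A (fun x => x) false   -- A.sort()
  let n : Int := PySem.List.len As                   -- n = len(A)
  -- for i in range(len(A)): sum1 = sum1 + (A[i]*n); n -= 1
  let st := (PySem.List.pyRange 0 (PySem.List.len As) 1).foldl
      (fun (st : Int × Int) i => (st.1 + PySem.List.pyGetD As i 0 * st.2, st.2 - 1)) (0, n)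
  st.1

-- ===== PORT B =====
-- 'for x in A: prefix += x; total += prefix' as the obvious structural recursion on the list
def bLoop : List Int → Int → Int → Int
  | [], _, total => total
  | x :: xs, pfx, total => bLoop xs (pfx + x) (total + (pfx + x))

def solve_alt (A : List Int) : Int :=
  bLoop (PySem.List.sorted A (fun x => x) false) 0 0

-- ===== PRECONDITION & SPEC =====
def Spec_solve (A : List Int) (out : Int) : Prop := out = solve_alt A
instance (A : List Int) (out : Int) : Decidable (Spec_solve A out) := by unfold Spec_solve; infer_instance

-- ===== CLAIM (what is proved, stated in full; the proofs are below) =====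
def Claim_equal_solve : Prop := ∀ (A : List Int), Dom_solve A → Spec_solve A (solve A)

-- ===== LEMMAS AND PROOFS =====

-- Loop invariant relating A's weighted accumulator to B's prefix-sum recursion.
theorem solve_key (l : List Int) (n s p t : Int) :
    (l.foldl (fun (st : Int × Int) x => (st.1 + x * st.2, st.2 - 1)) (s, n)).1
      = bLoop l p t + s - t - l.length * p + (n - l.length) * l.sum := by
  induction l generalizing n s p t with
  | nil => simp [bLoop]
  | cons x xs ih =>
      simp only [List.foldl_cons, bLoop, List.sum_cons, List.length_cons]
      rw [ih (n - 1) (s + x * n) (p + x) (t + (p + x))]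
      push_cast
      ring

-- ===== VERDICT (by name: the statement is the Claim_ definition above) =====
theorem solve_spec : Claim_equal_solve := by
  intro A _
  show solve A = solve_alt A
  simp only [solve, solve_alt]
  rw [PySem.List.foldl_pyRange_zero_pyGetD (PySem.List.sorted A (fun x => x) false) 0
        (fun (st : Int × Int) x => (st.1 + x * st.2, st.2 - 1))
        (0, PySem.List.len (PySem.List.sorted A (fun x => x) false))]
  rw [solve_key _ _ _ 0 0]
  simp [PySem.List.len]
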